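-- pv_equiv track=rewrite | github.com/AINetworkLab/MycoStore | src/utils/minio_utils.py | match_and_group
-- ===== SOURCE A (Python) =====
-- def match_and_group(L_prime, k, group):
--     for layer_id in L_prime:
--         prefix = layer_id[:k]
--         if prefix not in group:
--             group[prefix] = [layer_id]
--         else:
--             matched = False
--             for item in group[prefix]:
--                 if item == layer_id:
--                     matched = True
--                     break
--             if not matched:
--                 group[prefix].append(layer_id)
--     return group
-- ===== SOURCE B (Python) =====
-- def match_and_group(L_prime, k, group):
--     new = {}
--     for layer_id in L_prime:
--         new.setdefault(layer_id[:k], []).append(layer_id)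
--     for prefix, batch in new.items():
--         existing = group.setdefault(prefix, [])
--         for layer_id in batch:
--             if layer_id not in existing:
--                 existing.append(layer_id)
--     return group
-- ===== Notes on version B (the rewrite author's own statement) =====
-- stated objective: alternative
-- what changed: B replaces A's single pass (per-ID dict probe with an inline membership scan) by a two-pass decomposition: a first pass builds a fresh dict mapping each k-prefix to the list of all its IDs in encounter order, and a second pass merges each (prefix, batch) item into group via setdefault, appending only unseen IDs.
import Mathlib
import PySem

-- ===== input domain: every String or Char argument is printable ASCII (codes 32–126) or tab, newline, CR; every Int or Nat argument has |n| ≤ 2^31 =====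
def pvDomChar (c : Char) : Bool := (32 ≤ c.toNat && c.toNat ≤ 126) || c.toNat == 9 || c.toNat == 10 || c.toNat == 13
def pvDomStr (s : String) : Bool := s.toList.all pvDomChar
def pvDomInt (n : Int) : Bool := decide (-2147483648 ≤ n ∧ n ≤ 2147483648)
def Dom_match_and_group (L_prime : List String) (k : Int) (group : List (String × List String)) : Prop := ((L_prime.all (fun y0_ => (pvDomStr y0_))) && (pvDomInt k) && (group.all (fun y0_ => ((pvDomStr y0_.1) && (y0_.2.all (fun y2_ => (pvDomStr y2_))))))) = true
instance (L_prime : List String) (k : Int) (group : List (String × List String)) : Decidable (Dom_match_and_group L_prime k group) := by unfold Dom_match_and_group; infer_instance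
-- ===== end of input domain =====

-- B groups in two passes (distinct prefixes first, then one merge scan per prefix) instead of A's
-- single pass with an inline membership scan; equivalence is about the RETURN value only (both
-- Pythons also mutate `group` in place, in the same way).

-- ===== PORT A =====
def pvPrefix (k : Int) (layer_id : String) : String := PySem.Str.slice layer_id none (some k)

-- the inner 'for item in group[prefix]: if item == layer_id: matched = True; break' loop
def pvScan : List String → String → Bool
  | [], _ => false
  | item :: rest, layer_id => if item == layer_id then true else pvScan rest layer_id

def pvAStep (k : Int) (d : PySem.Dict String (List String)) (layer_id : String) :
    PySem.Dict String (List String) :=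
  if d.contains (pvPrefix k layer_id) = false then d.insert (pvPrefix k layer_id) [layer_id]
  else if pvScan (d.getD (pvPrefix k layer_id) []) layer_id then d
  else d.insert (pvPrefix k layer_id) (d.getD (pvPrefix k layer_id) [] ++ [layer_id])

def match_and_group (L_prime : List String) (k : Int) (group : List (String × List String)) :
    List (String × List String) :=
  (L_prime.foldl (pvAStep k) (PySem.Dict.mk group)).items

-- ===== PORT B =====
-- first pass: new.setdefault(layer_id[:k], []).append(layer_id)
def pvBStep (k : Int) (d : PySem.Dict String (List String)) (layer_id : String) :
    PySem.Dict String (List String) :=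
  d.modify (pvPrefix k layer_id) [] (fun v => v ++ [layer_id])

-- per-ID body of the merge loop ('if layer_id not in existing: existing.append(layer_id)')
def pvBInner (k : Int) (p : String) (d : PySem.Dict String (List String)) (layer_id : String) :
    PySem.Dict String (List String) :=
  if (d.getD p []).contains layer_id then d else d.insert p (d.getD p [] ++ [layer_id])

-- second pass, one item (prefix, batch) of new: existing = group.setdefault(prefix, []), then merge
def pvBMerge (k : Int) (g : PySem.Dict String (List String)) (pr : String × List String) :
    PySem.Dict String (List String) :=
  pr.2.foldl (pvBInner k pr.1) (g.setdefault pr.1 [])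

def match_and_group_alt (L_prime : List String) (k : Int) (group : List (String × List String)) :
    List (String × List String) :=
  let new := L_prime.foldl (pvBStep k) PySem.Dict.empty
  (new.items.foldl (pvBMerge k) (PySem.Dict.mk group)).items

-- ===== PRECONDITION & SPEC =====
def Spec_match_and_group (L_prime : List String) (k : Int) (group : List (String × List String)) (out : List (String × List String)) : Prop := out = match_and_group_alt L_prime k group
instance (L_prime : List String) (k : Int) (group : List (String × List String)) (out : List (String × List String)) : Decidable (Spec_match_and_group L_prime k group out) := by unfold Spec_match_and_group; infer_instance

-- ===== CLAIM (what is proved, stated in full; the proofs are below) =====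
def Claim_equal_match_and_group : Prop := ∀ (L_prime : List String) (k : Int) (group : List (String × List String)), Dom_match_and_group L_prime k group → Spec_match_and_group L_prime k group (match_and_group L_prime k group)

-- ===== LEMMAS AND PROOFS =====

theorem pvScan_eq (lst : List String) (lid : String) : pvScan lst lid = lst.contains lid := by
  induction lst with
  | nil => rfl
  | cons a t ih =>
      by_cases h : a = lid
      · simp [pvScan, h]
      · have hb : (a == lid) = false := by simpa using h
        have hb2 : (lid == a) = false := by simpa using (Ne.symm h)
        simp [pvScan, hb, hb2, ih, List.contains_cons]
        exact fun e => absurd e.symm h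

theorem contains_pvAStep_mono (k : Int) (d : PySem.Dict String (List String)) (x : String)
    (q : String) (hq : d.contains q = true) : (pvAStep k d x).contains q = true := by
  unfold pvAStep
  split_ifs <;> simp [PySem.Dict.contains_insert, hq]

theorem contains_pvAStep_self (k : Int) (d : PySem.Dict String (List String)) (x : String) :
    (pvAStep k d x).contains (pvPrefix k x) = true := by
  unfold pvAStep
  split_ifs with h1 h2 <;>
    simp_all [PySem.Dict.contains_insert]

theorem dict_insert_comm (d : PySem.Dict String (List String)) (p q : String)
    (v w : List String) (hne : p ≠ q) (hp : d.contains p = true) :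
    (d.insert q w).insert p v = (d.insert p v).insert q w := by
  apply PySem.Dict.ext
  have hqp : (q == p) = false := by simpa using (Ne.symm hne)
  by_cases hq : d.contains q = true
  · have h1 : (d.insert q w).contains p = true := by
      simp [PySem.Dict.contains_insert, hp]
    have h2 : (d.insert p v).contains q = true := by
      simp [PySem.Dict.contains_insert, hq]
    rw [PySem.Dict.items_insert_of_contains _ _ h1,
        PySem.Dict.items_insert_of_contains _ _ hq,
        PySem.Dict.items_insert_of_contains _ _ h2,
        PySem.Dict.items_insert_of_contains _ _ hp]
    simp only [List.map_map]
    apply List.map_congr_left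
    intro a _
    by_cases ha1 : a.1 = p <;> by_cases ha2 : a.1 = q <;>
      simp_all [Function.comp, hne]
  · have hq' : d.contains q = false := by simpa using hq
    have h1 : (d.insert q w).contains p = true := by
      simp [PySem.Dict.contains_insert, hp]
    have h2 : (d.insert p v).contains q = false := by
      simp [PySem.Dict.contains_insert, hq', hqp]
    rw [PySem.Dict.items_insert_of_contains _ _ h1,
        PySem.Dict.items_insert_of_not_contains _ _ hq',
        PySem.Dict.items_insert_of_not_contains _ _ h2,
        PySem.Dict.items_insert_of_contains _ _ hp]
    simp [List.map_append, hqp]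
    exact fun e => absurd e (Ne.symm hne)

theorem pvAStep_contains_of_ne (k : Int) (d : PySem.Dict String (List String)) (y : String)
    (p : String) (h : pvPrefix k y ≠ p) : (pvAStep k d y).contains p = d.contains p := by
  unfold pvAStep
  split_ifs <;> simp [PySem.Dict.contains_insert, Ne.symm h, *]

theorem pvAStep_comm (k : Int) (d : PySem.Dict String (List String)) (x y p : String)
    (hx : pvPrefix k x = p) (hy : pvPrefix k y ≠ p) (hp : d.contains p = true) :
    pvAStep k (pvAStep k d y) x = pvAStep k (pvAStep k d x) y := by
  have hpq : p ≠ pvPrefix k y := Ne.symm hy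
  have hb1 : (p == pvPrefix k y) = false := by simpa using hpq
  have hb2 : (pvPrefix k y == p) = false := by simpa using hy
  unfold pvAStep
  by_cases hcq : d.contains (pvPrefix k y) = true <;>
  by_cases hmy : pvScan (d.getD (pvPrefix k y) []) y = true <;>
  by_cases hmx : pvScan (d.getD p []) x = true <;>
  simp [hx, hp, hcq, hmy, hmx, PySem.Dict.contains_insert, hb1, hb2,
    PySem.Dict.getD_insert_of_ne _ _ _ hy, PySem.Dict.getD_insert_of_ne _ _ _ hpq] <;>
  exact dict_insert_comm d p _ _ _ hpq hp

theorem pv_swap_block (k : Int) (p : String) (M : List String)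
    (hM : ∀ m ∈ M, pvPrefix k m = p) (y : String) (hy : pvPrefix k y ≠ p) :
    ∀ d : PySem.Dict String (List String), d.contains p = true →
      M.foldl (pvAStep k) (pvAStep k d y) = pvAStep k (M.foldl (pvAStep k) d) y := by
  induction M with
  | nil => intro d _; rfl
  | cons m t ih =>
      intro d hp
      have hm : pvPrefix k m = p := hM m (by simp)
      simp only [List.foldl_cons]
      rw [pvAStep_comm k d m y p hm hy hp]
      exact ih (fun a ha => hM a (by simp [ha])) (pvAStep k d m) (contains_pvAStep_mono _ _ _ _ hp)

theorem pv_pull (k : Int) (p : String) :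
    ∀ (L : List String) (d : PySem.Dict String (List String)), d.contains p = true →
      L.foldl (pvAStep k) d =
        (L.filter (fun x => !(pvPrefix k x == p))).foldl (pvAStep k)
          ((L.filter (fun x => pvPrefix k x == p)).foldl (pvAStep k) d) := by
  intro L
  induction L with
  | nil => intro d _; rfl
  | cons h t ih =>
      intro d hp
      by_cases hc : pvPrefix k h = p
      · have hcb : (pvPrefix k h == p) = true := by simpa using hc
        simp only [List.foldl_cons, List.filter_cons, hcb, Bool.not_true, if_true, if_false,
          Bool.false_eq_true, Bool.true_eq_false, List.foldl_cons]
        exact ih (pvAStep k d h) (contains_pvAStep_mono _ _ _ _ hp)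
      · have hcb : (pvPrefix k h == p) = false := by simpa using hc
        simp only [List.foldl_cons, List.filter_cons, hcb, Bool.not_false, if_true, if_false,
          Bool.false_eq_true, Bool.true_eq_false, List.foldl_cons]
        rw [ih (pvAStep k d h) (by rw [pvAStep_contains_of_ne k d h p hc]; exact hp)]
        congr 1
        rw [pv_swap_block k p (t.filter (fun x => pvPrefix k x == p))
              (fun m hm => by simpa using (List.of_mem_filter hm)) h hc d hp]

theorem pvBInner_eq_pvAStep (k : Int) (p : String) (d : PySem.Dict String (List String))
    (m : String) (hm : pvPrefix k m = p) (hp : d.contains p = true) :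
    pvBInner k p d m = pvAStep k d m := by
  unfold pvBInner pvAStep
  simp [hm, hp, pvScan_eq]

theorem pv_foldl_bInner_eq (k : Int) (p : String) :
    ∀ (M : List String) (d : PySem.Dict String (List String)), d.contains p = true →
      (∀ m ∈ M, pvPrefix k m = p) →
      M.foldl (pvBInner k p) d = M.foldl (pvAStep k) d := by
  intro M
  induction M with
  | nil => intro d _ _; rfl
  | cons m t ih =>
      intro d hp hall
      have hm : pvPrefix k m = p := hall m (by simp)
      simp only [List.foldl_cons, pvBInner_eq_pvAStep k p d m hm hp]
      exact ih (pvAStep k d m) (contains_pvAStep_mono _ _ _ _ hp) (fun a ha => hall a (by simp [ha]))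

theorem pvBMerge_eq (k : Int) (p : String) (F : List String)
    (d : PySem.Dict String (List String)) (hne : F ≠ [])
    (hall : ∀ m ∈ F, pvPrefix k m = p) :
    pvBMerge k d (p, F) = F.foldl (pvAStep k) d := by
  unfold pvBMerge
  obtain ⟨f, F', hF⟩ := List.exists_cons_of_ne_nil hne
  subst hF
  have hfp : pvPrefix k f = p := hall f (by simp)
  have hFall : ∀ m ∈ F', pvPrefix k m = p := fun m hm => hall m (by simp [hm])
  by_cases hp : d.contains p = true
  · rw [PySem.Dict.setdefault_of_contains _ _ hp]
    exact pv_foldl_bInner_eq k p _ d hp hall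
  · have hp' : d.contains p = false := by simpa using hp
    rw [PySem.Dict.setdefault_of_not_contains _ _ hp']
    simp only [List.foldl_cons]
    have h1 : pvBInner k p (d.insert p []) f = d.insert p [f] := by
      unfold pvBInner
      simp [PySem.Dict.getD_insert_self, PySem.Dict.insert_insert_self]
    have h2 : pvAStep k d f = d.insert p [f] := by
      unfold pvAStep; simp [hfp, hp']
    rw [h1, h2]
    exact pv_foldl_bInner_eq k p F' (d.insert p [f])
      (by simp [PySem.Dict.contains_insert]) hFall

theorem pv_items_new (k : Int) (L : List String) :
    (L.foldl (pvBStep k) PySem.Dict.empty).items =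
      (PySem.List.dedup (L.map (pvPrefix k))).map
        (fun p => (p, L.filter (fun x => pvPrefix k x == p))) := by
  have hfold : L.foldl (pvBStep k) PySem.Dict.empty =
      L.foldl (fun d x => d.modify (pvPrefix k x) [] ((fun _ x v => v ++ [x]) d x))
        PySem.Dict.empty := rfl
  have hkeys : (L.foldl (pvBStep k) PySem.Dict.empty).keys =
      PySem.List.dedup (L.map (pvPrefix k)) := by
    rw [hfold, PySem.Dict.keys_foldl_modify_key, PySem.Dict.keys_empty,
      PySem.Set.update_nil_left]
    rfl
  have hnodup : (L.foldl (pvBStep k) PySem.Dict.empty).keys.Nodup := by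
    rw [hfold]
    exact PySem.Dict.nodup_keys_foldl_modify_key _ _ _ _ _ PySem.Dict.nodup_keys_empty
  have hgetD : ∀ p, (L.foldl (pvBStep k) PySem.Dict.empty).getD p [] =
      L.filter (fun x => pvPrefix k x == p) := by
    intro p
    have hmap : L.foldl (pvBStep k) PySem.Dict.empty =
        (L.map (fun x => (pvPrefix k x, x))).foldl
          (fun d pr => d.modify pr.1 [] (fun v => v ++ [pr.2])) PySem.Dict.empty := by
      rw [List.foldl_map]
      rfl
    rw [hmap, PySem.Dict.getD_foldl_modify_append, PySem.Dict.getD_empty]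
    rw [List.filter_map, List.map_map]
    simp only [Function.comp_def]
    simp
  rw [PySem.Dict.items_eq_map_keys _ hnodup [], hkeys]
  apply List.map_congr_left
  intro p _
  rw [hgetD p]
theorem pv_discard_comm (s : List String) (a b : String) :
    PySem.Set.discard (PySem.Set.discard s a) b =
      PySem.Set.discard (PySem.Set.discard s b) a := by
  simp only [PySem.Set.discard, List.filter_filter]
  apply List.filter_congr
  intro z _
  exact Bool.and_comm _ _

theorem pv_discard_idem (s : List String) (a : String) :
    PySem.Set.discard (PySem.Set.discard s a) a = PySem.Set.discard s a := by
  simp only [PySem.Set.discard, List.filter_filter]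
  apply List.filter_congr
  intro z _
  exact Bool.and_self _

theorem pv_discard_ofList (xs : List String) (x : String) :
    PySem.Set.discard (PySem.Set.ofList xs) x =
      PySem.Set.ofList (xs.filter (fun y => !(y == x))) := by
  induction xs with
  | nil => rfl
  | cons y t ih =>
      by_cases h : y = x
      · subst h
        rw [PySem.Set.ofList_cons]
        have h1 : PySem.Set.discard (y :: PySem.Set.discard (PySem.Set.ofList t) y) y =
            PySem.Set.discard (PySem.Set.discard (PySem.Set.ofList t) y) y := by
          simp [PySem.Set.discard, List.filter_cons]
        have h2 : (y :: t).filter (fun z => !(z == y)) = t.filter (fun z => !(z == y)) := by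
          simp [List.filter_cons]
        rw [h1, pv_discard_idem, ih, h2]
      · have hb : (y == x) = false := by simpa using h
        have h2 : (y :: t).filter (fun z => !(z == x)) = y :: t.filter (fun z => !(z == x)) := by
          simp [List.filter_cons, hb]
        rw [PySem.Set.ofList_cons, h2, PySem.Set.ofList_cons, ← ih, ← pv_discard_comm]
        have h1 : PySem.Set.discard (y :: PySem.Set.discard (PySem.Set.ofList t) y) x =
            y :: PySem.Set.discard (PySem.Set.discard (PySem.Set.ofList t) y) x := by
          simp [PySem.Set.discard, List.filter_cons, hb]
        rw [h1, pv_discard_comm]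

theorem pv_dedup_cons (x : String) (xs : List String) :
    PySem.List.dedup (x :: xs) = x :: PySem.List.dedup (xs.filter (fun y => !(y == x))) := by
  show PySem.Set.ofList (x :: xs) = x :: PySem.Set.ofList (xs.filter (fun y => !(y == x)))
  rw [PySem.Set.ofList_cons, pv_discard_ofList]

theorem pv_main (k : Int) :
    ∀ (n : Nat) (L : List String), L.length ≤ n →
      ∀ d : PySem.Dict String (List String),
        L.foldl (pvAStep k) d =
          (PySem.List.dedup (L.map (pvPrefix k))).foldl
            (fun d p => (L.filter (fun x => pvPrefix k x == p)).foldl (pvAStep k) d) d := by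
  intro n
  induction n with
  | zero =>
      intro L hL d
      have : L = [] := List.eq_nil_of_length_eq_zero (Nat.le_zero.1 hL)
      subst this; rfl
  | succ n ih =>
      intro L hL d
      cases L with
      | nil => rfl
      | cons h t =>
          set p0 := pvPrefix k h with hp0
          set Lne := t.filter (fun x => !(pvPrefix k x == p0)) with hLne
          -- LHS
          have hLfilter : (h :: t).filter (fun x => pvPrefix k x == p0) =
              h :: t.filter (fun x => pvPrefix k x == p0) := by
            simp [List.filter_cons]
            exact hp0.symm
          have hLfilterne : (h :: t).filter (fun x => !(pvPrefix k x == p0)) = Lne := by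
            simp only [List.filter_cons, hLne]
            have : (pvPrefix k h == p0) = true := by simp [hp0.symm]
            simp [this]
          have hLHS : (h :: t).foldl (pvAStep k) d =
              Lne.foldl (pvAStep k)
                (((h :: t).filter (fun x => pvPrefix k x == p0)).foldl (pvAStep k) d) := by
            rw [hLfilter]
            simp only [List.foldl_cons]
            have := pv_pull k p0 t (pvAStep k d h) (contains_pvAStep_self k d h)
            rw [this, hLne]
          -- RHS head
          have hmap : (h :: t).map (pvPrefix k) = p0 :: t.map (pvPrefix k) := by
            simp
            exact hp0.symm
          have hfm : (t.map (pvPrefix k)).filter (fun y => !(y == p0)) =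
              Lne.map (pvPrefix k) := by
            rw [hLne, List.filter_map]
            rfl
          have hded : PySem.List.dedup ((h :: t).map (pvPrefix k)) =
              p0 :: PySem.List.dedup (Lne.map (pvPrefix k)) := by
            rw [hmap, pv_dedup_cons, hfm]
          rw [hded]
          simp only [List.foldl_cons]
          -- the tail batches only look at Lne
          have hcong : ∀ (acc : PySem.Dict String (List String)),
              ∀ p ∈ PySem.List.dedup (Lne.map (pvPrefix k)),
              ((h :: t).filter (fun x => pvPrefix k x == p)).foldl (pvAStep k) acc =
              (Lne.filter (fun x => pvPrefix k x == p)).foldl (pvAStep k) acc := by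
            intro acc p hpmem
            have hpLne : p ∈ Lne.map (pvPrefix k) := by
              have := PySem.List.mem_dedup (xs := Lne.map (pvPrefix k)) (x := p)
              exact this.1 hpmem
            obtain ⟨x, hx, hxp⟩ := List.mem_map.1 hpLne
            have hxne : (pvPrefix k x == p0) = false := by
              have := (List.mem_filter.1 hx).2
              simpa using this
            have hpne : p ≠ p0 := by
              intro hEq; rw [hxp, hEq] at hxne; simp at hxne
            congr 1
            rw [List.filter_cons]
            have : (pvPrefix k h == p) = false := by
              simp [hp0.symm]; exact fun hh => hpne hh.symm
            simp only [this, cond_false, if_false]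
            rw [hLne, List.filter_filter]
            apply List.filter_congr
            intro a _
            by_cases ha : pvPrefix k a = p
            · simp [ha, hpne]
            · simp [ha]
          rw [PySem.List.foldl_congr_mem _ _ _ _ hcong]
          have hlen : Lne.length ≤ n := by
            have h1 : Lne.length ≤ t.length := List.length_filter_le _ _
            have h2 : t.length ≤ n := by simpa using Nat.le_of_succ_le_succ hL
            exact Nat.le_trans h1 h2
          rw [← ih Lne hlen _]
          exact hLHS

-- ===== VERDICT (by name: the statement is the Claim_ definition above) =====
theorem match_and_group_spec : Claim_equal_match_and_group := by
  intro L k group _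
  unfold Spec_match_and_group match_and_group match_and_group_alt
  congr 1
  rw [pv_items_new, List.foldl_map,
    pv_main k L.length L (Nat.le_refl _) (PySem.Dict.mk group)]
  apply PySem.List.foldl_congr_mem
  intro acc p hp
  have hpmem : p ∈ L.map (pvPrefix k) := by
    have := PySem.List.mem_dedup (xs := L.map (pvPrefix k)) (x := p)
    exact this.1 hp
  obtain ⟨x, hx, hxp⟩ := List.mem_map.1 hpmem
  have hne : L.filter (fun x => pvPrefix k x == p) ≠ [] := by
    intro hnil
    have : x ∈ L.filter (fun x => pvPrefix k x == p) :=
      List.mem_filter.2 ⟨hx, by simp [hxp]⟩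
    simp [hnil] at this
  rw [pvBMerge_eq k p _ acc hne
    (fun m hm => by simpa using (List.of_mem_filter hm))]
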